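-- pv_equiv track=rewrite | github.com/PeteMango/Contest | Online Assessment/TikTok S25/popular_content.py | GetOptimalContentStorage
-- ===== SOURCE A (Python) =====
-- def GetOptimalContentStorage(tiktokStorage):
--     # find the longest continuous substr of 1s and subtract from the total
--     num_ones = 0
--     for num in tiktokStorage:
--         if num == 1:
--             num_ones += 1
--
--     start_ones = 0
--     for i in range(num_ones):
--         if tiktokStorage[i] == 1:
--             start_ones += 1
--
--     end_ones = 0
--     for i in range(len(tiktokStorage) - num_ones, len(tiktokStorage)):
--         if tiktokStorage[i] == 1:
--             end_ones += 1
--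
--     return num_ones - max(start_ones, end_ones)
-- ===== SOURCE B (Python) =====
-- def GetOptimalContentStorage(tiktokStorage):
--     # One pass builds a prefix-count array; the three rescanning loops of A
--     # become O(1) lookups into it.
--     prefix = [0]
--     for num in tiktokStorage:
--         prefix.append(prefix[-1] + (1 if num == 1 else 0))
--     n = len(tiktokStorage)
--     num_ones = prefix[n]
--     start_ones = prefix[num_ones]
--     end_ones = num_ones - prefix[n - num_ones]
--     return num_ones - max(start_ones, end_ones)
-- ===== Notes on version B (the rewrite author's own statement) =====
-- stated objective: alternative
-- what changed: Replaces A's three counting loops (total + rescans of the first and last num_ones positions) with a single pass building a prefix-count array and three O(1) lookups into it.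
import Mathlib
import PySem

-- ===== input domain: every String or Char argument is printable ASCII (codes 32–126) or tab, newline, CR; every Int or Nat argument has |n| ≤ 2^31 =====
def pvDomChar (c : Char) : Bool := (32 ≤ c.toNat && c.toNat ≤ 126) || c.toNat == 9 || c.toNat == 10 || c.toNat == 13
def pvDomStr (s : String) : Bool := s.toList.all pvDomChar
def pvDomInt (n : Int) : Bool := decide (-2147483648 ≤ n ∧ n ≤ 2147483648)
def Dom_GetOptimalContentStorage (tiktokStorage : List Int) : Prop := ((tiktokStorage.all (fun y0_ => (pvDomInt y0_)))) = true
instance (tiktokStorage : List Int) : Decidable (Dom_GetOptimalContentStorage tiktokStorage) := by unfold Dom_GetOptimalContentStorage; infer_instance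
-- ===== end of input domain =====

-- B replaces A's three counting loops by one prefix-count-array pass plus O(1) lookups (alternative decomposition, similar cost).

-- ===== PORT A =====
-- tiktokStorage[i] is always in range in A (0 ≤ i < len, since num_ones ≤ len), so pyGetD with default 0 is exact.
def GetOptimalContentStorage (tiktokStorage : List Int) : Int :=
  let num_ones : Int := tiktokStorage.foldl (fun acc num => if num == 1 then acc + 1 else acc) 0
  let start_ones : Int := (PySem.List.pyRange 0 num_ones 1).foldl
    (fun acc i => if PySem.List.pyGetD tiktokStorage i 0 == 1 then acc + 1 else acc) 0
  let end_ones : Int := (PySem.List.pyRange ((tiktokStorage.length : Int) - num_ones) (tiktokStorage.length : Int) 1).foldl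
    (fun acc i => if PySem.List.pyGetD tiktokStorage i 0 == 1 then acc + 1 else acc) 0
  num_ones - max start_ones end_ones

-- ===== PORT B =====
-- 'pref' is Source B's 'prefix' ('prefix' is a Lean keyword); its indices are always in range
-- (pref has length n+1 and 0 ≤ k ≤ n), so pyGetD with default 0 is exact.
def GetOptimalContentStorage_alt (tiktokStorage : List Int) : Int :=
  let pref : List Int := tiktokStorage.foldl
    (fun p num => p ++ [PySem.List.pyGetD p (-1) 0 + (if num == 1 then 1 else 0)]) [0]
  let n : Int := (tiktokStorage.length : Int)
  let num_ones : Int := PySem.List.pyGetD pref n 0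
  let start_ones : Int := PySem.List.pyGetD pref num_ones 0
  let end_ones : Int := num_ones - PySem.List.pyGetD pref (n - num_ones) 0
  num_ones - max start_ones end_ones

-- ===== PRECONDITION & SPEC =====
def Spec_GetOptimalContentStorage (tiktokStorage : List Int) (out : Int) : Prop := out = GetOptimalContentStorage_alt tiktokStorage
instance (tiktokStorage : List Int) (out : Int) : Decidable (Spec_GetOptimalContentStorage tiktokStorage out) := by unfold Spec_GetOptimalContentStorage; infer_instance

-- ===== CLAIM (what is proved, stated in full; the proofs are below) =====
def Claim_equal_GetOptimalContentStorage : Prop := ∀ (tiktokStorage : List Int), Dom_GetOptimalContentStorage tiktokStorage → Spec_GetOptimalContentStorage tiktokStorage (GetOptimalContentStorage tiktokStorage)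

-- ===== LEMMAS AND PROOFS =====

-- number of ones among the first k elements
def pvC (xs : List Int) (k : Nat) : Int := ((xs.take k).countP (fun x => x == 1) : Int)

-- B's prefix fold, started from any nonempty accumulator, appends exactly the running prefix counts.
theorem pv_prefix_eq (xs : List Int) (p0 : List Int) (hp0 : p0 ≠ []) :
    xs.foldl (fun p num => p ++ [PySem.List.pyGetD p (-1) 0 + (if num == 1 then 1 else 0)]) p0
      = p0 ++ (List.range xs.length).map
          (fun k => PySem.List.pyGetD p0 (-1) 0 + ((xs.take (k+1)).countP (fun x => x == 1) : Int)) := by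
  induction xs generalizing p0 with
  | nil => simp
  | cons num rest ih =>
    rw [List.foldl_cons, ih _ (by simp)]
    rw [PySem.List.pyGetD_neg_one_append_singleton]
    rw [List.length_cons, List.range_succ_eq_map, List.map_cons, List.map_map]
    simp only [List.append_assoc, List.singleton_append]
    refine congrArg (fun t => p0 ++ t) ?_
    rw [List.cons_eq_cons]
    constructor
    · simp
    · apply List.map_congr_left
      intro a _
      simp only [Function.comp_apply, List.take_succ_cons, List.countP_cons]
      push_cast
      by_cases h : num = 1
      · simp [h]; ring
      · simp [h]
-- indexing B's prefix list at k gives the count of ones among the first k elements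
theorem pv_prefix_getD (xs : List Int) (k : Nat) (hk : k ≤ xs.length) :
    PySem.List.pyGetD
      (xs.foldl (fun p num => p ++ [PySem.List.pyGetD p (-1) 0 + (if num == 1 then 1 else 0)]) [0])
      (k : Int) 0 = pvC xs k := by
  rw [pv_prefix_eq xs [0] (by simp)]
  rw [PySem.List.pyGetD_natCast]
  match k with
  | 0 => simp [pvC]
  | j+1 =>
    have hj : j < xs.length := by omega
    simp only [List.singleton_append, List.getD_cons_succ]
    rw [PySem.List.getD_map_range _ _ _ _ hj]
    have h0 : PySem.List.pyGetD [(0:Int)] (-1) 0 = 0 := by decide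
    simp [pvC, h0]

-- ===== VERDICT (by name: the statement is the Claim_ definition above) =====
theorem GetOptimalContentStorage_spec : Claim_equal_GetOptimalContentStorage := by
  intro xs _
  unfold Spec_GetOptimalContentStorage GetOptimalContentStorage GetOptimalContentStorage_alt
  set m : Nat := xs.countP (fun x => x == 1) with hmdef
  have hmle : m ≤ xs.length := List.countP_le_length
  have hA1 : xs.foldl (fun acc num => if num == 1 then acc + 1 else acc) 0 = (m : Int) := by
    simpa using PySem.List.foldl_if_add_one (fun x => x == 1) xs 0
  -- B's lookups
  have hBn : PySem.List.pyGetD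
      (xs.foldl (fun p num => p ++ [PySem.List.pyGetD p (-1) 0 + (if num == 1 then 1 else 0)]) [0])
      ((xs.length : Int)) 0 = (m : Int) := by
    rw [pv_prefix_getD xs xs.length le_rfl]; simp [pvC, hmdef]
  have hBm : PySem.List.pyGetD
      (xs.foldl (fun p num => p ++ [PySem.List.pyGetD p (-1) 0 + (if num == 1 then 1 else 0)]) [0])
      ((m : Int)) 0 = pvC xs m := pv_prefix_getD xs m hmle
  have hcast : ((xs.length : Int)) - (m : Int) = ((xs.length - m : Nat) : Int) := by
    push_cast [Nat.cast_sub hmle]; ring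
  have hBe : PySem.List.pyGetD
      (xs.foldl (fun p num => p ++ [PySem.List.pyGetD p (-1) 0 + (if num == 1 then 1 else 0)]) [0])
      ((xs.length : Int) - (m : Int)) 0 = pvC xs (xs.length - m) := by
    rw [hcast]; exact pv_prefix_getD xs (xs.length - m) (by omega)
  -- A's start loop counts the ones among the first num_ones elements
  have hstart : (PySem.List.pyRange 0 ((m : Int)) 1).foldl
      (fun acc i => if PySem.List.pyGetD xs i 0 == 1 then acc + 1 else acc) 0 = pvC xs m := by
    have hcg : (PySem.List.pyRange 0 ((m : Int)) 1).foldl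
        (fun acc i => if PySem.List.pyGetD xs i 0 == 1 then acc + 1 else acc) (0 : Int)
        = (PySem.List.pyRange 0 ((m : Int)) 1).foldl
        (fun acc i => if PySem.List.pyGetD (xs.take m) i 0 == 1 then acc + 1 else acc) (0 : Int) := by
      apply PySem.List.foldl_congr_mem
      intro acc j hj
      rw [PySem.List.mem_pyRange_one] at hj
      have hjm : j.toNat < m := by omega
      rw [PySem.List.pyGetD_eq_getElem xs 0 hj.1 (by omega),
          PySem.List.pyGetD_eq_getElem (xs.take m) 0 hj.1 (by rw [List.length_take]; omega)]
      simp [List.getElem_take]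
    refine hcg.trans ?_
    have hlen : ((m : Int)) = (((xs.take m).length : Nat) : Int) := by simp [hmle]
    rw [hlen]
    rw [PySem.List.foldl_pyRange_pyGetD' (xs.take m) 0
      (fun acc v => if v == 1 then acc + 1 else acc) 0 (by omega)]
    rw [PySem.List.foldl_if_add_one (fun v => v == 1)]
    simp [pvC]
  -- A's end loop counts the ones among the last num_ones elements
  have hend : (PySem.List.pyRange ((xs.length : Int) - (m : Int)) ((xs.length : Int)) 1).foldl
      (fun acc i => if PySem.List.pyGetD xs i 0 == 1 then acc + 1 else acc) 0
      = ((xs.drop (xs.length - m)).countP (fun x => x == 1) : Int) := by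
    rw [PySem.List.foldl_pyRange_pyGetD' xs 0
      (fun acc v => if v == 1 then acc + 1 else acc) 0 (by omega)]
    have ht : ((xs.length : Int) - (m : Int)).toNat = xs.length - m := by omega
    rw [ht, PySem.List.foldl_if_add_one]
    simp
  have hsplit : (xs.take (xs.length - m)).countP (fun x => x == 1)
      + (xs.drop (xs.length - m)).countP (fun x => x == 1) = m := by
    rw [← List.countP_append, List.take_append_drop]
  simp only [hA1, hBn, hBm, hBe, hstart, hend]
  have h1 : ((xs.drop (xs.length - m)).countP (fun x => x == 1) : Int)
      = (m : Int) - pvC xs (xs.length - m) := by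
    simp only [pvC]; omega
  rw [h1]
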